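-- pv_equiv track=rewrite | github.com/joshpearce/aoc | 2020/11/main.py | unseat_ppl
-- ===== SOURCE A (Python) =====
-- from typing import List, Tuple, Dict, Set
--
-- def status_at(r: int, c: int, seats: List[str]) -> str:
--     width, height = len(seats[0]), len(seats)
--     if r < 0 or r >= height:
--         return " "
--     if c < 0 or c >= width:
--         return " "
--     return seats[r][c]
--
-- def occ_sightline(r: int, c: int, seats: List[str], extent: int = 1) -> int:
--
--     vecs = ['.'] * 8
--     for m in range(1, extent+1):
--         n = status_at(r-m,c, seats)
--         ne = status_at(r-m, c+m, seats)
--         e = status_at(r, c+m, seats)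
--         se = status_at(r+m, c+m, seats)
--         s = status_at(r+m, c, seats)
--         sw = status_at(r+m, c-m, seats)
--         w = status_at(r, c-m, seats)
--         nw = status_at(r-m, c-m, seats)
--
--         cur = [n, ne, e, se, s, sw, w, nw]
--         for i in range(8):
--             if vecs[i] not in ('L', '#', ' '):
--                 vecs[i] = cur[i]
--
--         if all(x in ('L', '#', ' ') for x in vecs):
--             break
--
--     return sum([1 if x == '#' else 0 for x in vecs])
--
-- def unseat_ppl(seats: List[str], extent: int = 1, tolerence: int = 4) -> List[str]:
--     w, h = len(seats[0]), len(seats)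
--     new_seats = [
--                 ''.join(['L'
--                     if seats[r][c] == '#' and occ_sightline(r, c, seats, extent) >= tolerence
--                     else seats[r][c]
--                     for c in range(0, w)
--                 ])
--             for r in range(0, h)]
--     return new_seats
-- ===== SOURCE B (Python) =====
-- # B: instead of walking every sightline from every seat, do 8 dynamic-programming
-- # sweeps that compute, for each cell, the first visible stopper (char, distance)
-- # per direction, then one pass over the grid.
-- def unseat_ppl(seats, extent=1, tolerence=4):
--     h = len(seats)
--     w = len(seats[0])
--     STOP = ('L', '#', ' ')
--
--     def cell(r, c):
--         if 0 <= r < h and 0 <= c < w: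
--             return seats[r][c]
--         return ' '
--
--     def sweep_vert(dr, dc):
--         # rows processed so the row a cell depends on (row r+dr) comes first
--         order = range(h) if dr < 0 else range(h - 1, -1, -1)
--         rows = []
--         prev = None
--         for r in order:
--             cur = []
--             for c in range(w):
--                 nc = c + dc
--                 ncell = cell(r + dr, nc)
--                 if ncell in STOP:
--                     cur.append((ncell, 1))
--                 else:
--                     pch, pd = prev[nc]
--                     cur.append((pch, pd + 1))
--             rows.append(cur)
--             prev = cur
--         if dr > 0:
--             rows.reverse()
--         return rows
--
--     def sweep_horiz(dc):
--         rows = []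
--         for r in range(h):
--             order = range(w - 1, -1, -1) if dc > 0 else range(w)
--             cur = []
--             prev = None
--             for c in order:
--                 ncell = cell(r, c + dc)
--                 if ncell in STOP:
--                     e = (ncell, 1)
--                 else:
--                     e = (prev[0], prev[1] + 1)
--                 cur.append(e)
--                 prev = e
--             if dc > 0:
--                 cur.reverse()
--             rows.append(cur)
--         return rows
--
--     tables = [sweep_vert(-1, 0), sweep_vert(-1, 1), sweep_horiz(1), sweep_vert(1, 1),
--               sweep_vert(1, 0), sweep_vert(1, -1), sweep_horiz(-1), sweep_vert(-1, -1)]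
--
--     out = []
--     for r in range(h):
--         row = []
--         for c in range(w):
--             ch = seats[r][c]
--             occ = sum(1 if t[r][c][0] == '#' and t[r][c][1] <= extent else 0 for t in tables)
--             row.append('L' if ch == '#' and occ >= tolerence else ch)
--         out.append(''.join(row))
--     return out
-- ===== Notes on version B (the rewrite author's own statement) =====
-- stated objective: alternative
-- what changed: A walks all 8 sightlines outward from every '#' seat in lockstep with a break; B instead precomputes, by eight whole-grid DP sweeps in dependency order, the nearest visible stopper (char, distance) per direction for every cell, then builds the new grid in one pass.
import Mathlib
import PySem

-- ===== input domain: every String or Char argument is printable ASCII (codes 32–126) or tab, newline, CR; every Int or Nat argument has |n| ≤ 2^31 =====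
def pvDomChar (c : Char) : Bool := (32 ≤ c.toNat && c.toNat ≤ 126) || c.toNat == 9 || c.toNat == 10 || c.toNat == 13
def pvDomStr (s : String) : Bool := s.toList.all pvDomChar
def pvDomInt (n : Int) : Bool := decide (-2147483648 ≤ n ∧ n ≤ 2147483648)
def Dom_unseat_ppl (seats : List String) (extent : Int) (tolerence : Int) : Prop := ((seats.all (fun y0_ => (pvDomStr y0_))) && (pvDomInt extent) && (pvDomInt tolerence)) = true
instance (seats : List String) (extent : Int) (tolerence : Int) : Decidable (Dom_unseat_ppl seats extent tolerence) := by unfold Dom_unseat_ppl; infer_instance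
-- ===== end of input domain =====

-- B replaces A's per-seat lockstep walk along all 8 sightlines by eight whole-grid DP
-- sweeps (nearest visible stopper per direction), then one pass; same return value on Pre_.

-- ===== PORT A =====
-- status_at(r, c, seats); the in-range seats[r][c] is total here (pyGetD ' '):
-- Pre_ guarantees every row has at least len(seats[0]) chars, so the index is in range.
def pvA_status (r c : Int) (seats : List String) : Char :=
  let width : Int := PySem.Str.len (PySem.List.pyGetD seats 0 "")
  let height : Int := PySem.List.len seats
  if r < 0 ∨ height ≤ r then ' '
  else if c < 0 ∨ width ≤ c then ' '
  else PySem.List.pyGetD (PySem.List.pyGetD seats r "").toList c ' '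

-- the 'for m in range(1, extent+1)' loop of occ_sightline, with its break
def pvA_loop (r c : Int) (seats : List String) (extent : Int) (m : Int) (vecs : List Char) :
    List Char :=
  if extent + 1 ≤ m then vecs
  else
    let n  := pvA_status (r - m) c seats
    let ne := pvA_status (r - m) (c + m) seats
    let e  := pvA_status r (c + m) seats
    let se := pvA_status (r + m) (c + m) seats
    let s  := pvA_status (r + m) c seats
    let sw := pvA_status (r + m) (c - m) seats
    let w  := pvA_status r (c - m) seats
    let nw := pvA_status (r - m) (c - m) seats
    let cur : List Char := [n, ne, e, se, s, sw, w, nw]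
    let vecs' := List.zipWith
      (fun v cu => if ¬(v = 'L' ∨ v = '#' ∨ v = ' ') then cu else v) vecs cur
    if vecs'.all (fun x => decide (x = 'L' ∨ x = '#' ∨ x = ' ')) then vecs'
    else pvA_loop r c seats extent (m + 1) vecs'
  termination_by (extent + 1 - m).toNat
  decreasing_by omega

-- occ_sightline(r, c, seats, extent)
def pvA_occ (r c : Int) (seats : List String) (extent : Int) : Int :=
  let vecs := pvA_loop r c seats extent 1 (PySem.List.pyRepeat ['.'] 8)
  (vecs.map (fun x => if x = '#' then (1 : Int) else 0)).sum

-- ''.join of single chars is String.ofList of the char list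
def unseat_ppl (seats : List String) (extent : Int) (tolerence : Int) : List String :=
  let w : Int := PySem.Str.len (PySem.List.pyGetD seats 0 "")
  let h : Int := PySem.List.len seats
  (PySem.List.pyRange 0 h 1).map (fun r =>
    String.ofList ((PySem.List.pyRange 0 w 1).map (fun c =>
      if PySem.List.pyGetD (PySem.List.pyGetD seats r "").toList c ' ' = '#' ∧
          tolerence ≤ pvA_occ r c seats extent
      then 'L'
      else PySem.List.pyGetD (PySem.List.pyGetD seats r "").toList c ' ')))

-- ===== PORT B =====
-- cell(r, c) of Source B (same total in-range read as A's status_at, under Pre_)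
def pvB_cell (seats : List String) (h w r c : Int) : Char :=
  if 0 ≤ r ∧ r < h ∧ 0 ≤ c ∧ c < w then
    PySem.List.pyGetD (PySem.List.pyGetD seats r "").toList c ' '
  else ' '

-- sweep_vert(dr, dc): fold over the row order with state (rows so far, prev row);
-- prev starts as [] (Python's None): it is only read when the neighbour row exists.
def pvB_sweepVert (seats : List String) (h w dr dc : Int) : List (List (Char × Int)) :=
  let order := if dr < 0 then PySem.List.pyRange 0 h 1 else PySem.List.pyRange (h - 1) (-1) (-1)
  let st := order.foldl
    (fun (st : List (List (Char × Int)) × List (Char × Int)) r =>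
      let cur := (PySem.List.pyRange 0 w 1).map (fun c =>
        let nc := c + dc
        let ncell := pvB_cell seats h w (r + dr) nc
        if ncell = 'L' ∨ ncell = '#' ∨ ncell = ' ' then (ncell, (1 : Int))
        else
          let p := PySem.List.pyGetD st.2 nc (' ', 1)
          (p.1, p.2 + 1))
      (st.1 ++ [cur], cur))
    ([], [])
  if 0 < dr then st.1.reverse else st.1

-- sweep_horiz(dc): per row, fold over the column order with state (entries, prev entry)
def pvB_sweepHoriz (seats : List String) (h w dc : Int) : List (List (Char × Int)) :=
  (PySem.List.pyRange 0 h 1).map (fun r =>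
    let order := if 0 < dc then PySem.List.pyRange (w - 1) (-1) (-1) else PySem.List.pyRange 0 w 1
    let st := order.foldl
      (fun (st : List (Char × Int) × (Char × Int)) c =>
        let ncell := pvB_cell seats h w r (c + dc)
        let e := if ncell = 'L' ∨ ncell = '#' ∨ ncell = ' ' then (ncell, (1 : Int))
                 else (st.2.1, st.2.2 + 1)
        (st.1 ++ [e], e))
      ([], (' ', 1))
    if 0 < dc then st.1.reverse else st.1)

def unseat_ppl_alt (seats : List String) (extent : Int) (tolerence : Int) : List String :=
  let h : Int := PySem.List.len seats
  let w : Int := PySem.Str.len (PySem.List.pyGetD seats 0 "")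
  let tables : List (List (List (Char × Int))) :=
    [pvB_sweepVert seats h w (-1) 0, pvB_sweepVert seats h w (-1) 1,
     pvB_sweepHoriz seats h w 1, pvB_sweepVert seats h w 1 1,
     pvB_sweepVert seats h w 1 0, pvB_sweepVert seats h w 1 (-1),
     pvB_sweepHoriz seats h w (-1), pvB_sweepVert seats h w (-1) (-1)]
  (PySem.List.pyRange 0 h 1).map (fun r =>
    String.ofList ((PySem.List.pyRange 0 w 1).map (fun c =>
      let ch := PySem.List.pyGetD (PySem.List.pyGetD seats r "").toList c ' '
      let occ := (tables.map (fun t =>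
        let e := PySem.List.pyGetD (PySem.List.pyGetD t r []) c (' ', 1)
        if e.1 = '#' ∧ e.2 ≤ extent then (1 : Int) else 0)).sum
      if ch = '#' ∧ tolerence ≤ occ then 'L' else ch)))

-- ===== PRECONDITION & SPEC =====
-- Pre_ excludes exactly the inputs where the Python A raises IndexError: an empty
-- grid (seats[0]) and grids with a row shorter than the first row (seats[r][c]).
def Pre_unseat_ppl (seats : List String) (extent : Int) (tolerence : Int) : Prop :=
  seats ≠ [] ∧ ∀ s ∈ seats, PySem.Str.len (PySem.List.pyGetD seats 0 "") ≤ PySem.Str.len s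

instance (seats : List String) (extent : Int) (tolerence : Int) :
    Decidable (Pre_unseat_ppl seats extent tolerence) := by
  unfold Pre_unseat_ppl; infer_instance

def pvWitness_unseat_ppl : List String × Int × Int := (["#L", "L#"], 1, 1)

def Spec_unseat_ppl (seats : List String) (extent : Int) (tolerence : Int) (out : List String) : Prop := out = unseat_ppl_alt seats extent tolerence
instance (seats : List String) (extent : Int) (tolerence : Int) (out : List String) : Decidable (Spec_unseat_ppl seats extent tolerence out) := by unfold Spec_unseat_ppl; infer_instance

-- ===== CLAIM (what is proved, stated in full; the proofs are below) =====
def Claim_equal_unseat_ppl : Prop := ∀ (seats : List String) (extent : Int) (tolerence : Int), Dom_unseat_ppl seats extent tolerence → Pre_unseat_ppl seats extent tolerence → Spec_unseat_ppl seats extent tolerence (unseat_ppl seats extent tolerence)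

-- ===== LEMMAS AND PROOFS =====

-- grid dimensions as the ports compute them
def pvHt (seats : List String) : Int := PySem.List.len seats
def pvWd (seats : List String) : Int := PySem.Str.len (PySem.List.pyGetD seats 0 "")

-- "stopper" characters: what blocks a sightline
def pvStop (x : Char) : Prop := x = 'L' ∨ x = '#' ∨ x = ' '


-- reference walk along one direction: (first stopper char, its distance), fuel-indexed
def pvWalk (seats : List String) (dr dc : Int) : Nat → Int → Int → Char × Int
  | 0, _, _ => (' ', 1)
  | fuel+1, r, c =>
    let ch := pvA_status (r + dr) (c + dc) seats
    if ch = 'L' ∨ ch = '#' ∨ ch = ' ' then (ch, 1)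
    else
      let p := pvWalk seats dr dc fuel (r + dr) (c + dc)
      (p.1, p.2 + 1)

-- enough fuel: steps until the probed cell leaves the grid along the moving axis
def pvBnd (seats : List String) (dr dc r c : Int) : Nat :=
  if dr = 1 then (pvHt seats - r).toNat
  else if dr = -1 then (r + 1).toNat
  else if dc = 1 then (pvWd seats - c).toNat
  else (c + 1).toNat

def pvWalkAt (seats : List String) (dr dc r c : Int) : Char × Int :=
  pvWalk seats dr dc (pvBnd seats dr dc r c) r c

def pvDirOk (dr dc : Int) : Prop := dr = 1 ∨ dr = -1 ∨ (dr = 0 ∧ (dc = 1 ∨ dc = -1))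

def pvDirs : List (Int × Int) :=
  [(-1, 0), (-1, 1), (0, 1), (1, 1), (1, 0), (1, -1), (0, -1), (-1, -1)]

-- partially resolved value of one sightline after k loop steps of A
def pvPartial (seats : List String) (dr dc r c k : Int) : Char :=
  let p := pvWalkAt seats dr dc r c
  if p.2 ≤ k then p.1
  else if k ≤ 0 then '.'
  else pvA_status (r + k * dr) (c + k * dc) seats

lemma pvA_status_row_oob (seats : List String) (r c : Int)
    (h : r < 0 ∨ pvHt seats ≤ r) : pvA_status r c seats = ' ' := by
  unfold pvHt at h
  simp only [pvA_status]
  rw [if_pos h]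

lemma pvA_status_col_oob (seats : List String) (r c : Int)
    (h : c < 0 ∨ pvWd seats ≤ c) : pvA_status r c seats = ' ' := by
  unfold pvWd at h
  simp only [pvA_status]
  split_ifs with h1 h2 <;> first | rfl | exact absurd h h2

lemma pvA_status_ne_space (seats : List String) (r c : Int)
    (h : pvA_status r c seats ≠ ' ') :
    0 ≤ r ∧ r < pvHt seats ∧ 0 ≤ c ∧ c < pvWd seats := by
  simp only [pvA_status] at h
  unfold pvHt pvWd
  split_ifs at h with h1 h2
  · exact absurd rfl h
  · exact absurd rfl h
  · rw [not_or, not_lt, not_le] at h1 h2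
    omega

lemma pvBnd_zero (seats : List String) (dr dc r c : Int) (hd : pvDirOk dr dc)
    (h : pvBnd seats dr dc r c = 0) : pvA_status (r + dr) (c + dc) seats = ' ' := by
  simp only [pvBnd] at h
  rcases hd with h1 | h1 | ⟨h1, h2 | h2⟩
  · subst h1
    norm_num at h
    exact pvA_status_row_oob seats _ _ (by omega)
  · subst h1
    norm_num at h
    exact pvA_status_row_oob seats _ _ (by omega)
  · subst h1; subst h2
    norm_num at h
    exact pvA_status_col_oob seats _ _ (by omega)
  · subst h1; subst h2
    norm_num at h
    exact pvA_status_col_oob seats _ _ (by omega)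

lemma pvBnd_succ (seats : List String) (dr dc r c : Int) (hd : pvDirOk dr dc) (b : Nat)
    (h : pvBnd seats dr dc r c = b + 1) : pvBnd seats dr dc (r + dr) (c + dc) = b := by
  simp only [pvBnd] at h ⊢
  rcases hd with h1 | h1 | ⟨h1, h2 | h2⟩ <;> subst h1 <;> first
    | (norm_num at h ⊢; omega)
    | (subst h2; norm_num at h ⊢; omega)

lemma pvWalk_step (seats : List String) (dr dc r c : Int) (hd : pvDirOk dr dc) :
    pvWalkAt seats dr dc r c =
      (let ch := pvA_status (r + dr) (c + dc) seats
       if ch = 'L' ∨ ch = '#' ∨ ch = ' ' then (ch, 1)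
       else
         let p := pvWalkAt seats dr dc (r + dr) (c + dc)
         (p.1, p.2 + 1)) := by
  cases hb0 : pvBnd seats dr dc r c with
  | zero =>
    have hsp := pvBnd_zero seats dr dc r c hd hb0
    conv_lhs => unfold pvWalkAt; rw [hb0]
    simp [pvWalk, hsp]
  | succ b =>
    conv_lhs => unfold pvWalkAt; rw [hb0]
    simp only [pvWalk]
    by_cases hstop : pvA_status (r + dr) (c + dc) seats = 'L' ∨
        pvA_status (r + dr) (c + dc) seats = '#' ∨ pvA_status (r + dr) (c + dc) seats = ' '
    · simp [hstop]
    · simp only [if_neg hstop]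
      have hb1 : pvBnd seats dr dc (r + dr) (c + dc) = b := pvBnd_succ seats dr dc r c hd b hb0
      have e2 : pvWalk seats dr dc b (r + dr) (c + dc) = pvWalkAt seats dr dc (r + dr) (c + dc) := by
        unfold pvWalkAt; rw [hb1]
      rw [e2]

lemma pvWalk_spec (seats : List String) (dr dc : Int) (hd : pvDirOk dr dc) (r c : Int) :
    1 ≤ (pvWalkAt seats dr dc r c).2 ∧
    (pvWalkAt seats dr dc r c).1 =
      pvA_status (r + (pvWalkAt seats dr dc r c).2 * dr)
        (c + (pvWalkAt seats dr dc r c).2 * dc) seats ∧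
    pvStop (pvWalkAt seats dr dc r c).1 ∧
    ∀ k : Int, 1 ≤ k → k < (pvWalkAt seats dr dc r c).2 →
      ¬ pvStop (pvA_status (r + k * dr) (c + k * dc) seats) := by
  have H : ∀ (n : Nat) (r c : Int), pvBnd seats dr dc r c = n →
      1 ≤ (pvWalkAt seats dr dc r c).2 ∧
      (pvWalkAt seats dr dc r c).1 =
        pvA_status (r + (pvWalkAt seats dr dc r c).2 * dr)
          (c + (pvWalkAt seats dr dc r c).2 * dc) seats ∧
      pvStop (pvWalkAt seats dr dc r c).1 ∧
      ∀ k : Int, 1 ≤ k → k < (pvWalkAt seats dr dc r c).2 →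
        ¬ pvStop (pvA_status (r + k * dr) (c + k * dc) seats) := by
    intro n
    induction n with
    | zero =>
      intro r c hb
      have hsp := pvBnd_zero seats dr dc r c hd hb
      have hP : pvWalkAt seats dr dc r c = (' ', 1) := by
        unfold pvWalkAt; rw [hb]; simp [pvWalk]
      rw [hP]
      refine ⟨le_refl 1, ?_, Or.inr (Or.inr rfl), ?_⟩
      · simpa using hsp.symm
      · intro k hk1 hk2; omega
    | succ b ih =>
      intro r c hb
      by_cases hstop : pvA_status (r + dr) (c + dc) seats = 'L' ∨
          pvA_status (r + dr) (c + dc) seats = '#' ∨ pvA_status (r + dr) (c + dc) seats = ' '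
      · have hP : pvWalkAt seats dr dc r c = (pvA_status (r + dr) (c + dc) seats, 1) := by
          rw [pvWalk_step seats dr dc r c hd]; simp [hstop]
        rw [hP]
        refine ⟨le_refl 1, by simp, hstop, ?_⟩
        intro k hk1 hk2; omega
      · have hb1 : pvBnd seats dr dc (r + dr) (c + dc) = b := pvBnd_succ seats dr dc r c hd b hb
        obtain ⟨ih1, ih2, ih3, ih4⟩ := ih (r + dr) (c + dc) hb1
        have hP : pvWalkAt seats dr dc r c =
            ((pvWalkAt seats dr dc (r + dr) (c + dc)).1,
             (pvWalkAt seats dr dc (r + dr) (c + dc)).2 + 1) := by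
          rw [pvWalk_step seats dr dc r c hd]; simp [hstop]
        rw [hP]
        refine ⟨by omega, ?_, ih3, ?_⟩
        · have e : r + dr + (pvWalkAt seats dr dc (r + dr) (c + dc)).2 * dr =
              r + ((pvWalkAt seats dr dc (r + dr) (c + dc)).2 + 1) * dr := by ring
          have e' : c + dc + (pvWalkAt seats dr dc (r + dr) (c + dc)).2 * dc =
              c + ((pvWalkAt seats dr dc (r + dr) (c + dc)).2 + 1) * dc := by ring
          rw [← e, ← e']
          exact ih2
        · intro k hk1 hk2
          rcases eq_or_lt_of_le hk1 with hk | hk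
          · have : r + k * dr = r + dr ∧ c + k * dc = c + dc := by
              constructor <;> (rw [← hk]; ring)
            rw [this.1, this.2]
            unfold pvStop
            exact hstop
          · have e : r + k * dr = r + dr + (k - 1) * dr := by ring
            have e' : c + k * dc = c + dc + (k - 1) * dc := by ring
            rw [e, e']
            exact ih4 (k - 1) (by omega) (by omega)
  exact H _ r c rfl

lemma pvPartial_zero (seats : List String) (dr dc r c : Int) (hd : pvDirOk dr dc) :
    pvPartial seats dr dc r c 0 = '.' := by
  obtain ⟨h1, -, -, -⟩ := pvWalk_spec seats dr dc hd r c
  simp only [pvPartial]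
  rw [if_neg (by omega), if_pos (le_refl (0 : Int))]

lemma pvPartial_stop_iff (seats : List String) (dr dc r c k : Int) (hd : pvDirOk dr dc)
    (hk : 0 ≤ k) :
    pvStop (pvPartial seats dr dc r c k) ↔ (pvWalkAt seats dr dc r c).2 ≤ k := by
  obtain ⟨h1, h2, h3, h4⟩ := pvWalk_spec seats dr dc hd r c
  simp only [pvPartial]
  split_ifs with hle hk0
  · exact iff_of_true h3 hle
  · exact iff_of_false (by unfold pvStop; decide) hle
  · exact iff_of_false (h4 k (by omega) (by omega)) hle

lemma pvPartial_frozen (seats : List String) (dr dc r c k k' : Int)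
    (h2 : (pvWalkAt seats dr dc r c).2 ≤ k) (hkk : k ≤ k') :
    pvPartial seats dr dc r c k = pvPartial seats dr dc r c k' := by
  simp only [pvPartial]
  rw [if_pos h2, if_pos (le_trans h2 hkk)]

lemma pvPartial_upd (seats : List String) (dr dc r c m : Int) (hd : pvDirOk dr dc)
    (hm : 1 ≤ m) (a b : Int) (ha : a = r + m * dr) (hb : b = c + m * dc) :
    (if ¬ (pvPartial seats dr dc r c (m - 1) = 'L' ∨ pvPartial seats dr dc r c (m - 1) = '#' ∨
           pvPartial seats dr dc r c (m - 1) = ' ')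
     then pvA_status a b seats
     else pvPartial seats dr dc r c (m - 1)) = pvPartial seats dr dc r c m := by
  subst ha; subst hb
  obtain ⟨h1, h2, h3, h4⟩ := pvWalk_spec seats dr dc hd r c
  by_cases hstop : pvPartial seats dr dc r c (m - 1) = 'L' ∨
      pvPartial seats dr dc r c (m - 1) = '#' ∨ pvPartial seats dr dc r c (m - 1) = ' '
  · rw [if_neg (not_not_intro hstop)]
    have hle : (pvWalkAt seats dr dc r c).2 ≤ m - 1 :=
      (pvPartial_stop_iff seats dr dc r c (m - 1) hd (by omega)).mp hstop
    exact pvPartial_frozen seats dr dc r c (m - 1) m hle (by omega)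
  · rw [if_pos hstop]
    have hgt : ¬ (pvWalkAt seats dr dc r c).2 ≤ m - 1 := fun hle =>
      hstop ((pvPartial_stop_iff seats dr dc r c (m - 1) hd (by omega)).mpr hle)
    simp only [pvPartial]
    split_ifs with hle2 hm0
    · -- p.2 ≤ m, so p.2 = m: the walk's stopper is exactly the char probed at step m
      have hm : (pvWalkAt seats dr dc r c).2 = m := by omega
      rw [← hm]
      exact h2.symm
    · omega
    · rfl

lemma pvPartial_hash (seats : List String) (dr dc r c extent : Int) (hd : pvDirOk dr dc) :
    (pvPartial seats dr dc r c (max extent 0) = '#') ↔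
      ((pvWalkAt seats dr dc r c).1 = '#' ∧ (pvWalkAt seats dr dc r c).2 ≤ extent) := by
  obtain ⟨h1, h2, h3, h4⟩ := pvWalk_spec seats dr dc hd r c
  have hmax := max_cases extent (0 : Int)
  simp only [pvPartial]
  split_ifs with hle hk0
  · constructor
    · intro hh
      exact ⟨hh, by omega⟩
    · exact fun hh => hh.1
  · refine iff_of_false (by decide) ?_
    rintro ⟨-, hh⟩
    omega
  · refine iff_of_false ?_ ?_
    · intro hh
      exact h4 (max extent 0) (by omega) (by omega) (Or.inr (Or.inl hh))
    · rintro ⟨-, hh⟩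
      omega

lemma pvDirs_ok : ∀ d ∈ pvDirs, pvDirOk d.1 d.2 := by
  intro d hdm
  unfold pvDirs at hdm
  fin_cases hdm <;> (unfold pvDirOk; norm_num)

lemma pvPartial_stop_iff' (seats : List String) (dr dc r c k : Int) (hd : pvDirOk dr dc)
    (hk : 0 ≤ k) :
    (pvPartial seats dr dc r c k = 'L' ∨ pvPartial seats dr dc r c k = '#' ∨
      pvPartial seats dr dc r c k = ' ') ↔ (pvWalkAt seats dr dc r c).2 ≤ k :=
  pvPartial_stop_iff seats dr dc r c k hd hk

lemma pvA_loop_eq (seats : List String) (r c extent : Int) :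
    ∀ (m : Int), 1 ≤ m → m ≤ max extent 0 + 1 →
      pvA_loop r c seats extent m (pvDirs.map (fun d => pvPartial seats d.1 d.2 r c (m - 1))) =
        pvDirs.map (fun d => pvPartial seats d.1 d.2 r c (max extent 0)) := by
  have H : ∀ (n : Nat) (m : Int), (max extent 0 + 1 - m).toNat = n → 1 ≤ m →
      m ≤ max extent 0 + 1 →
      pvA_loop r c seats extent m (pvDirs.map (fun d => pvPartial seats d.1 d.2 r c (m - 1))) =
        pvDirs.map (fun d => pvPartial seats d.1 d.2 r c (max extent 0)) := by
    intro n
    induction n using Nat.strong_induction_on with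
    | _ n ih =>
      intro m hn h1 h2
      have hmax := max_cases extent (0 : Int)
      rw [pvA_loop]
      by_cases hdone : extent + 1 ≤ m
      · rw [if_pos hdone]
        have hm1 : m - 1 = max extent 0 := by omega
        rw [hm1]
      · rw [if_neg hdone]
        have hEe : max extent 0 = extent := by omega
        have hm : (1 : Int) ≤ m := h1
        have u1 := pvPartial_upd seats (-1) 0 r c m (by unfold pvDirOk; norm_num) hm
          (r - m) c (by ring) (by ring)
        have u2 := pvPartial_upd seats (-1) 1 r c m (by unfold pvDirOk; norm_num) hm
          (r - m) (c + m) (by ring) (by ring)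
        have u3 := pvPartial_upd seats 0 1 r c m (by unfold pvDirOk; norm_num) hm
          r (c + m) (by ring) (by ring)
        have u4 := pvPartial_upd seats 1 1 r c m (by unfold pvDirOk; norm_num) hm
          (r + m) (c + m) (by ring) (by ring)
        have u5 := pvPartial_upd seats 1 0 r c m (by unfold pvDirOk; norm_num) hm
          (r + m) c (by ring) (by ring)
        have u6 := pvPartial_upd seats 1 (-1) r c m (by unfold pvDirOk; norm_num) hm
          (r + m) (c - m) (by ring) (by ring)
        have u7 := pvPartial_upd seats 0 (-1) r c m (by unfold pvDirOk; norm_num) hm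
          r (c - m) (by ring) (by ring)
        have u8 := pvPartial_upd seats (-1) (-1) r c m (by unfold pvDirOk; norm_num) hm
          (r - m) (c - m) (by ring) (by ring)
        simp only [pvDirs, List.map_cons, List.map_nil, List.zipWith_cons_cons,
          List.zipWith_nil_right]
        rw [u1, u2, u3, u4, u5, u6, u7, u8]
        by_cases hall : ((pvPartial seats (-1) 0 r c m = 'L' ∨ pvPartial seats (-1) 0 r c m = '#' ∨
              pvPartial seats (-1) 0 r c m = ' ') ∧
            (pvPartial seats (-1) 1 r c m = 'L' ∨ pvPartial seats (-1) 1 r c m = '#' ∨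
              pvPartial seats (-1) 1 r c m = ' ') ∧
            (pvPartial seats 0 1 r c m = 'L' ∨ pvPartial seats 0 1 r c m = '#' ∨
              pvPartial seats 0 1 r c m = ' ') ∧
            (pvPartial seats 1 1 r c m = 'L' ∨ pvPartial seats 1 1 r c m = '#' ∨
              pvPartial seats 1 1 r c m = ' ') ∧
            (pvPartial seats 1 0 r c m = 'L' ∨ pvPartial seats 1 0 r c m = '#' ∨
              pvPartial seats 1 0 r c m = ' ') ∧
            (pvPartial seats 1 (-1) r c m = 'L' ∨ pvPartial seats 1 (-1) r c m = '#' ∨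
              pvPartial seats 1 (-1) r c m = ' ') ∧
            (pvPartial seats 0 (-1) r c m = 'L' ∨ pvPartial seats 0 (-1) r c m = '#' ∨
              pvPartial seats 0 (-1) r c m = ' ') ∧
            (pvPartial seats (-1) (-1) r c m = 'L' ∨ pvPartial seats (-1) (-1) r c m = '#' ∨
              pvPartial seats (-1) (-1) r c m = ' '))
        · obtain ⟨a1, a2, a3, a4, a5, a6, a7, a8⟩ := hall
          rw [if_pos (by simp [List.all_cons, a1, a2, a3, a4, a5, a6, a7, a8])]
          have hk0 : (0 : Int) ≤ m := by omega
          have hmE : m ≤ max extent 0 := by omega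
          rw [pvPartial_frozen seats (-1) 0 r c m _
              ((pvPartial_stop_iff' seats (-1) 0 r c m (by unfold pvDirOk; norm_num) hk0).mp a1) hmE,
            pvPartial_frozen seats (-1) 1 r c m _
              ((pvPartial_stop_iff' seats (-1) 1 r c m (by unfold pvDirOk; norm_num) hk0).mp a2) hmE,
            pvPartial_frozen seats 0 1 r c m _
              ((pvPartial_stop_iff' seats 0 1 r c m (by unfold pvDirOk; norm_num) hk0).mp a3) hmE,
            pvPartial_frozen seats 1 1 r c m _
              ((pvPartial_stop_iff' seats 1 1 r c m (by unfold pvDirOk; norm_num) hk0).mp a4) hmE,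
            pvPartial_frozen seats 1 0 r c m _
              ((pvPartial_stop_iff' seats 1 0 r c m (by unfold pvDirOk; norm_num) hk0).mp a5) hmE,
            pvPartial_frozen seats 1 (-1) r c m _
              ((pvPartial_stop_iff' seats 1 (-1) r c m (by unfold pvDirOk; norm_num) hk0).mp a6) hmE,
            pvPartial_frozen seats 0 (-1) r c m _
              ((pvPartial_stop_iff' seats 0 (-1) r c m (by unfold pvDirOk; norm_num) hk0).mp a7) hmE,
            pvPartial_frozen seats (-1) (-1) r c m _
              ((pvPartial_stop_iff' seats (-1) (-1) r c m (by unfold pvDirOk; norm_num) hk0).mp a8) hmE]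
        · rw [if_neg (by
            simp only [List.all_cons, List.all_nil, Bool.and_eq_true, decide_eq_true_eq,
              Bool.and_true]
            tauto)]
          have hrec := ih ((max extent 0 + 1 - (m + 1)).toNat) (by omega) (m + 1) rfl
            (by omega) (by omega)
          simp only [add_sub_cancel_right, pvDirs, List.map_cons, List.map_nil] at hrec
          exact hrec
  exact fun m h1 h2 => H ((max extent 0 + 1 - m).toNat) m rfl h1 h2

lemma pvA_occ_eq (seats : List String) (r c extent : Int) :
    pvA_occ r c seats extent =
      (pvDirs.map (fun d =>
        if (pvWalkAt seats d.1 d.2 r c).1 = '#' ∧ (pvWalkAt seats d.1 d.2 r c).2 ≤ extent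
        then (1 : Int) else 0)).sum := by
  simp only [pvA_occ]
  have h0 : PySem.List.pyRepeat ['.'] 8 =
      pvDirs.map (fun d => pvPartial seats d.1 d.2 r c (1 - 1)) := by
    rw [PySem.List.pyRepeat_singleton]
    have dk : ∀ d ∈ pvDirs, pvDirOk d.1 d.2 := pvDirs_ok
    simp only [pvDirs] at dk
    norm_num at dk
    obtain ⟨k1, k2, k3, k4, k5, k6, k7, k8⟩ := dk
    simp only [pvDirs, List.map_cons, List.map_nil]
    norm_num
    rw [pvPartial_zero seats (-1) 0 r c k1, pvPartial_zero seats (-1) 1 r c k2,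
      pvPartial_zero seats 0 1 r c k3, pvPartial_zero seats 1 1 r c k4,
      pvPartial_zero seats 1 0 r c k5, pvPartial_zero seats 1 (-1) r c k6,
      pvPartial_zero seats 0 (-1) r c k7, pvPartial_zero seats (-1) (-1) r c k8]
    simp [List.replicate]
  rw [h0, pvA_loop_eq seats r c extent 1 (by omega) (by omega), List.map_map]
  congr 1
  apply List.map_congr_left
  intro d hdm
  have hd := pvDirs_ok d hdm
  simp only [Function.comp_apply]
  simp only [pvPartial_hash seats d.1 d.2 r c extent hd]

-- ---- B side ----

def pvSpecRow (seats : List String) (dr dc r : Int) : List (Char × Int) :=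
  (PySem.List.pyRange 0 (pvWd seats) 1).map (fun c => pvWalkAt seats dr dc r c)

lemma pvB_cell_eq (seats : List String) (r c : Int) :
    pvB_cell seats (pvHt seats) (pvWd seats) r c = pvA_status r c seats := by
  unfold pvB_cell
  split_ifs with h
  · unfold pvHt pvWd at h
    simp only [pvA_status]
    rw [if_neg (by omega), if_neg (by omega)]
  · have h2 : r < 0 ∨ pvHt seats ≤ r ∨ c < 0 ∨ pvWd seats ≤ c := by omega
    rcases h2 with h2 | h2 | h2 | h2
    · exact (pvA_status_row_oob seats r c (Or.inl h2)).symm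
    · exact (pvA_status_row_oob seats r c (Or.inr h2)).symm
    · exact (pvA_status_col_oob seats r c (Or.inl h2)).symm
    · exact (pvA_status_col_oob seats r c (Or.inr h2)).symm

-- the reversed countdown order, mapped, is the ascending order mapped
lemma pvRevMap {α : Type} (f : Int → α) :
    ∀ (n : Nat) (a : Int), a + 1 = (n : Int) →
      ((PySem.List.pyRange a (-1) (-1)).map f).reverse =
        (PySem.List.pyRange 0 (a + 1) 1).map f := by
  intro n
  induction n with
  | zero =>
    intro a ha
    rw [PySem.List.pyRange_neg_one_eq_nil (by omega), PySem.List.pyRange_one_eq_nil (by omega)]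
    simp
  | succ k ih =>
    intro a ha
    rw [PySem.List.pyRange_neg_one_cons (by omega)]
    have e1 : a - 1 + 1 = (k : Int) := by omega
    rw [List.map_cons, List.reverse_cons, ih (a - 1) e1]
    have h4 : a - 1 + 1 = a := by omega
    rw [h4]
    have h3 : PySem.List.pyRange 0 (a + 1) 1 = PySem.List.pyRange 0 a 1 ++ [a] :=
      PySem.List.pyRange_one_succ_right (by omega)
    rw [h3, List.map_append, List.map_singleton]

-- the step function of sweep_vert, named so the fold can be reasoned about
def pvVStep (seats : List String) (h w dr dc : Int)
    (st : List (List (Char × Int)) × List (Char × Int)) (r : Int) :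
    List (List (Char × Int)) × List (Char × Int) :=
  let cur := (PySem.List.pyRange 0 w 1).map (fun c =>
    let nc := c + dc
    let ncell := pvB_cell seats h w (r + dr) nc
    if ncell = 'L' ∨ ncell = '#' ∨ ncell = ' ' then (ncell, (1 : Int))
    else
      let p := PySem.List.pyGetD st.2 nc (' ', 1)
      (p.1, p.2 + 1))
  (st.1 ++ [cur], cur)

lemma pvB_sweepVert_def (seats : List String) (h w dr dc : Int) :
    pvB_sweepVert seats h w dr dc =
      (let order := if dr < 0 then PySem.List.pyRange 0 h 1
        else PySem.List.pyRange (h - 1) (-1) (-1)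
       let st := order.foldl (pvVStep seats h w dr dc) ([], [])
       if 0 < dr then st.1.reverse else st.1) := rfl

lemma pvVStep_cur (seats : List String) (dr dc : Int) (hdir : pvDirOk dr dc) (r : Int)
    (st : List (List (Char × Int)) × List (Char × Int))
    (hprev : 0 ≤ r + dr → r + dr < pvHt seats → st.2 = pvSpecRow seats dr dc (r + dr)) :
    pvVStep seats (pvHt seats) (pvWd seats) dr dc st r =
      (st.1 ++ [pvSpecRow seats dr dc r], pvSpecRow seats dr dc r) := by
  have hcur : (PySem.List.pyRange 0 (pvWd seats) 1).map (fun c =>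
      let nc := c + dc
      let ncell := pvB_cell seats (pvHt seats) (pvWd seats) (r + dr) nc
      if ncell = 'L' ∨ ncell = '#' ∨ ncell = ' ' then (ncell, (1 : Int))
      else
        let p := PySem.List.pyGetD st.2 nc (' ', 1)
        (p.1, p.2 + 1)) = pvSpecRow seats dr dc r := by
    unfold pvSpecRow
    apply List.map_congr_left
    intro cc hcc
    rw [PySem.List.mem_pyRange_one] at hcc
    simp only [pvB_cell_eq]
    rw [pvWalk_step seats dr dc r cc hdir]
    by_cases hstop : pvA_status (r + dr) (cc + dc) seats = 'L' ∨
        pvA_status (r + dr) (cc + dc) seats = '#' ∨ pvA_status (r + dr) (cc + dc) seats = ' '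
    · simp only [if_pos hstop]
    · simp only [if_neg hstop]
      have hin := pvA_status_ne_space seats (r + dr) (cc + dc)
        (fun hsp => hstop (Or.inr (Or.inr hsp)))
      rw [hprev hin.1 hin.2.1]
      unfold pvSpecRow
      rw [PySem.List.pyGetD_map_pyRange_of_nonneg _ _ _ _ hin.2.2.1 hin.2.2.2]
  unfold pvVStep
  rw [hcur]

lemma pvB_vfoldAsc (seats : List String) (dr dc : Int) (hdir : pvDirOk dr dc)
    (hdr : dr = -1) :
    ∀ (n : Nat) (r0 : Int), (pvHt seats - r0).toNat = n → 0 ≤ r0 →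
      ∀ (acc : List (List (Char × Int))) (prev : List (Char × Int)),
        (0 < r0 → prev = pvSpecRow seats dr dc (r0 - 1)) →
        ((PySem.List.pyRange r0 (pvHt seats) 1).foldl
            (pvVStep seats (pvHt seats) (pvWd seats) dr dc) (acc, prev)).1 =
          acc ++ (PySem.List.pyRange r0 (pvHt seats) 1).map (pvSpecRow seats dr dc) := by
  intro n
  induction n with
  | zero =>
    intro r0 hn h0 acc prev hprev
    rw [PySem.List.pyRange_one_eq_nil (by omega)]
    simp
  | succ k ih =>
    intro r0 hn h0 acc prev hprev
    rw [PySem.List.pyRange_one_cons (by omega)]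
    simp only [List.foldl_cons, List.map_cons]
    rw [pvVStep_cur seats dr dc hdir r0 (acc, prev)
      (by intro hge hlt; subst hdr; exact hprev (by omega))]
    rw [ih (r0 + 1) (by omega) (by omega) _ _
      (by intro _; rw [add_sub_cancel_right])]
    simp

lemma pvB_vfoldDesc (seats : List String) (dr dc : Int) (hdir : pvDirOk dr dc)
    (hdr : dr = 1) :
    ∀ (n : Nat) (r0 : Int), (r0 + 1).toNat = n → r0 < pvHt seats →
      ∀ (acc : List (List (Char × Int))) (prev : List (Char × Int)),
        (r0 < pvHt seats - 1 → prev = pvSpecRow seats dr dc (r0 + 1)) →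
        ((PySem.List.pyRange r0 (-1) (-1)).foldl
            (pvVStep seats (pvHt seats) (pvWd seats) dr dc) (acc, prev)).1 =
          acc ++ (PySem.List.pyRange r0 (-1) (-1)).map (pvSpecRow seats dr dc) := by
  intro n
  induction n with
  | zero =>
    intro r0 hn h0 acc prev hprev
    rw [PySem.List.pyRange_neg_one_eq_nil (by omega)]
    simp
  | succ k ih =>
    intro r0 hn h0 acc prev hprev
    rw [PySem.List.pyRange_neg_one_cons (by omega)]
    simp only [List.foldl_cons, List.map_cons]
    rw [pvVStep_cur seats dr dc hdir r0 (acc, prev)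
      (by intro hge hlt; subst hdr; exact hprev (by omega))]
    rw [ih (r0 - 1) (by omega) (by omega) _ _
      (by intro _; rw [sub_add_cancel])]
    simp

lemma pvB_sweepVert_eq (seats : List String) (dr dc : Int) (hdr : dr = 1 ∨ dr = -1) :
    pvB_sweepVert seats (pvHt seats) (pvWd seats) dr dc =
      (PySem.List.pyRange 0 (pvHt seats) 1).map (fun r => pvSpecRow seats dr dc r) := by
  rw [pvB_sweepVert_def]
  rcases hdr with hdr | hdr
  · subst hdr
    rw [if_neg (show ¬ ((1 : Int) < 0) by norm_num), if_pos (show (0 : Int) < 1 by norm_num)]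
    by_cases hH : pvHt seats ≤ 0
    · rw [PySem.List.pyRange_neg_one_eq_nil (by omega), PySem.List.pyRange_one_eq_nil (by omega)]
      simp
    · rw [pvB_vfoldDesc seats 1 dc (by unfold pvDirOk; norm_num) rfl
        (pvHt seats - 1 + 1).toNat (pvHt seats - 1) rfl (by omega) [] [] (by intro hcon; omega)]
      rw [List.nil_append]
      have hrev := pvRevMap (pvSpecRow seats 1 dc) (pvHt seats).toNat (pvHt seats - 1) (by omega)
      rw [show pvHt seats - 1 + 1 = pvHt seats from by omega] at hrev
      exact hrev
  · subst hdr
    rw [if_pos (show (-1 : Int) < 0 by norm_num), if_neg (show ¬ ((0 : Int) < -1) by norm_num)]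
    rw [pvB_vfoldAsc seats (-1) dc (by unfold pvDirOk; norm_num) rfl
      (pvHt seats - 0).toNat 0 rfl (by omega) [] [] (by intro hcon; omega)]
    rw [List.nil_append]

-- the per-column step function of sweep_horiz
def pvHStep (seats : List String) (h w dc r : Int)
    (st : List (Char × Int) × (Char × Int)) (c : Int) : List (Char × Int) × (Char × Int) :=
  let ncell := pvB_cell seats h w r (c + dc)
  let e := if ncell = 'L' ∨ ncell = '#' ∨ ncell = ' ' then (ncell, (1 : Int))
           else (st.2.1, st.2.2 + 1)
  (st.1 ++ [e], e)

lemma pvB_sweepHoriz_def (seats : List String) (h w dc : Int) :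
    pvB_sweepHoriz seats h w dc =
      (PySem.List.pyRange 0 h 1).map (fun r =>
        let order := if 0 < dc then PySem.List.pyRange (w - 1) (-1) (-1)
          else PySem.List.pyRange 0 w 1
        let st := order.foldl (pvHStep seats h w dc r) ([], (' ', 1))
        if 0 < dc then st.1.reverse else st.1) := rfl

lemma pvHStep_e (seats : List String) (dc : Int) (hdir : pvDirOk 0 dc) (r c : Int)
    (st : List (Char × Int) × (Char × Int))
    (hprev : 0 ≤ c + dc → c + dc < pvWd seats → st.2 = pvWalkAt seats 0 dc r (c + dc)) :
    pvHStep seats (pvHt seats) (pvWd seats) dc r st c =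
      (st.1 ++ [pvWalkAt seats 0 dc r c], pvWalkAt seats 0 dc r c) := by
  have he : (if pvB_cell seats (pvHt seats) (pvWd seats) r (c + dc) = 'L' ∨
        pvB_cell seats (pvHt seats) (pvWd seats) r (c + dc) = '#' ∨
        pvB_cell seats (pvHt seats) (pvWd seats) r (c + dc) = ' '
      then (pvB_cell seats (pvHt seats) (pvWd seats) r (c + dc), (1 : Int))
      else (st.2.1, st.2.2 + 1)) = pvWalkAt seats 0 dc r c := by
    simp only [pvB_cell_eq]
    rw [pvWalk_step seats 0 dc r c hdir]
    simp only [add_zero]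
    by_cases hstop : pvA_status r (c + dc) seats = 'L' ∨
        pvA_status r (c + dc) seats = '#' ∨ pvA_status r (c + dc) seats = ' '
    · simp only [if_pos hstop]
    · simp only [if_neg hstop]
      have hin := pvA_status_ne_space seats r (c + dc)
        (fun hsp => hstop (Or.inr (Or.inr hsp)))
      rw [hprev hin.2.2.1 hin.2.2.2]
  simp only [pvHStep]
  rw [he]

lemma pvB_hfoldAsc (seats : List String) (dc : Int) (hdir : pvDirOk 0 dc)
    (hdc : dc = -1) (r : Int) :
    ∀ (n : Nat) (c0 : Int), (pvWd seats - c0).toNat = n → 0 ≤ c0 →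
      ∀ (acc : List (Char × Int)) (prevE : Char × Int),
        (0 < c0 → prevE = pvWalkAt seats 0 dc r (c0 - 1)) →
        ((PySem.List.pyRange c0 (pvWd seats) 1).foldl
            (pvHStep seats (pvHt seats) (pvWd seats) dc r) (acc, prevE)).1 =
          acc ++ (PySem.List.pyRange c0 (pvWd seats) 1).map (fun c => pvWalkAt seats 0 dc r c) := by
  intro n
  induction n with
  | zero =>
    intro c0 hn h0 acc prevE hprev
    rw [PySem.List.pyRange_one_eq_nil (by omega)]
    simp
  | succ k ih =>
    intro c0 hn h0 acc prevE hprev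
    rw [PySem.List.pyRange_one_cons (by omega)]
    simp only [List.foldl_cons, List.map_cons]
    rw [pvHStep_e seats dc hdir r c0 (acc, prevE)
      (by intro hge hlt; subst hdc; exact hprev (by omega))]
    rw [ih (c0 + 1) (by omega) (by omega) _ _
      (by intro _; rw [add_sub_cancel_right])]
    simp

lemma pvB_hfoldDesc (seats : List String) (dc : Int) (hdir : pvDirOk 0 dc)
    (hdc : dc = 1) (r : Int) :
    ∀ (n : Nat) (c0 : Int), (c0 + 1).toNat = n → c0 < pvWd seats →
      ∀ (acc : List (Char × Int)) (prevE : Char × Int),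
        (c0 < pvWd seats - 1 → prevE = pvWalkAt seats 0 dc r (c0 + 1)) →
        ((PySem.List.pyRange c0 (-1) (-1)).foldl
            (pvHStep seats (pvHt seats) (pvWd seats) dc r) (acc, prevE)).1 =
          acc ++ (PySem.List.pyRange c0 (-1) (-1)).map (fun c => pvWalkAt seats 0 dc r c) := by
  intro n
  induction n with
  | zero =>
    intro c0 hn h0 acc prevE hprev
    rw [PySem.List.pyRange_neg_one_eq_nil (by omega)]
    simp
  | succ k ih =>
    intro c0 hn h0 acc prevE hprev
    rw [PySem.List.pyRange_neg_one_cons (by omega)]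
    simp only [List.foldl_cons, List.map_cons]
    rw [pvHStep_e seats dc hdir r c0 (acc, prevE)
      (by intro hge hlt; subst hdc; exact hprev (by omega))]
    rw [ih (c0 - 1) (by omega) (by omega) _ _
      (by intro _; rw [sub_add_cancel])]
    simp

lemma pvB_sweepHoriz_eq (seats : List String) (dc : Int) (hdc : dc = 1 ∨ dc = -1) :
    pvB_sweepHoriz seats (pvHt seats) (pvWd seats) dc =
      (PySem.List.pyRange 0 (pvHt seats) 1).map (fun r => pvSpecRow seats 0 dc r) := by
  rw [pvB_sweepHoriz_def]
  apply List.map_congr_left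
  intro r _hr
  unfold pvSpecRow
  rcases hdc with hdc | hdc
  · subst hdc
    rw [if_pos (show (0 : Int) < 1 by norm_num), if_pos (show (0 : Int) < 1 by norm_num)]
    by_cases hW : pvWd seats ≤ 0
    · rw [PySem.List.pyRange_neg_one_eq_nil (by omega), PySem.List.pyRange_one_eq_nil (by omega)]
      simp
    · rw [pvB_hfoldDesc seats 1 (by unfold pvDirOk; norm_num) rfl r
        (pvWd seats - 1 + 1).toNat (pvWd seats - 1) rfl (by omega) [] (' ', 1)
        (by intro hcon; omega)]
      rw [List.nil_append]
      have hrev := pvRevMap (fun c => pvWalkAt seats 0 1 r c) (pvWd seats).toNat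
        (pvWd seats - 1) (by omega)
      rw [show pvWd seats - 1 + 1 = pvWd seats from by omega] at hrev
      exact hrev
  · subst hdc
    rw [if_neg (show ¬ ((0 : Int) < -1) by norm_num), if_neg (show ¬ ((0 : Int) < -1) by norm_num)]
    rw [pvB_hfoldAsc seats (-1) (by unfold pvDirOk; norm_num) rfl r
      (pvWd seats - 0).toNat 0 rfl (by omega) [] (' ', 1) (by intro hcon; omega)]
    rw [List.nil_append]

-- ===== VERDICT (by name: the statement is the Claim_ definition above) =====
theorem unseat_ppl_spec : Claim_equal_unseat_ppl := by
  intro seats extent tolerence _hdom _hpre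
  unfold Spec_unseat_ppl
  simp only [unseat_ppl, unseat_ppl_alt]
  rw [show PySem.List.len seats = pvHt seats from rfl,
      show PySem.Str.len (PySem.List.pyGetD seats 0 "") = pvWd seats from rfl]
  apply List.map_congr_left
  intro r hr
  rw [PySem.List.mem_pyRange_one] at hr
  congr 1
  apply List.map_congr_left
  intro c hc
  rw [PySem.List.mem_pyRange_one] at hc
  have hlookR : ∀ (f : Int → List (Char × Int)),
      PySem.List.pyGetD ((PySem.List.pyRange 0 (pvHt seats) 1).map f) r [] = f r :=
    fun f => PySem.List.pyGetD_map_pyRange_of_nonneg f _ r [] hr.1 hr.2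
  have hlookC : ∀ (f : Int → Char × Int),
      PySem.List.pyGetD ((PySem.List.pyRange 0 (pvWd seats) 1).map f) c (' ', 1) = f c :=
    fun f => PySem.List.pyGetD_map_pyRange_of_nonneg f _ c (' ', 1) hc.1 hc.2
  rw [pvA_occ_eq seats r c extent]
  rw [pvB_sweepVert_eq seats (-1) 0 (Or.inr rfl), pvB_sweepVert_eq seats (-1) 1 (Or.inr rfl),
      pvB_sweepHoriz_eq seats 1 (Or.inl rfl), pvB_sweepVert_eq seats 1 1 (Or.inl rfl),
      pvB_sweepVert_eq seats 1 0 (Or.inl rfl), pvB_sweepVert_eq seats 1 (-1) (Or.inl rfl),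
      pvB_sweepHoriz_eq seats (-1) (Or.inr rfl), pvB_sweepVert_eq seats (-1) (-1) (Or.inr rfl)]
  simp only [pvDirs, List.map_cons, List.map_nil, hlookR, pvSpecRow, hlookC]
  rfl
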